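-- pv_equiv track=rewrite | github.com/Samar97/CS-386-Artificial-Intelligence-Lab | LAB 3/hillclimb.py | prehelper
-- ===== SOURCE A (Python) =====
-- def prehelper(mst, initial_city, list_so_far,visited):
-- 	list_so_far.append(initial_city)
-- 	visited[initial_city-1] = 1
-- 	for i in range(len(mst)):
-- 		if mst[i][0] == initial_city and visited[mst[i][1]-1] == 0:
-- 			list_so_far,visited = prehelper(mst,mst[i][1],list_so_far,visited)
-- 		if mst[i][1] == initial_city and visited[mst[i][0]-1] == 0:
-- 			list_so_far,visited = prehelper(mst,mst[i][0],list_so_far,visited)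
-- 	return list_so_far,visited
-- ===== SOURCE B (Python) =====
-- def prehelper(mst, initial_city, list_so_far, visited):
--     # Build a directed-pair list (both directions, edge order preserved),
--     # index it into an adjacency dict once, then DFS over the adjacency
--     # lists instead of rescanning the whole edge list at every node.
--     pairs = []
--     for e in mst:
--         pairs.append((e[0], e[1]))
--         pairs.append((e[1], e[0]))
--     adj = {}
--     for a, b in pairs:
--         adj.setdefault(a, []).append(b)
--
--     def dfs(c):
--         list_so_far.append(c)
--         visited[c - 1] = 1
--         for n in adj.get(c, []):
--             if visited[n - 1] == 0:
--                 dfs(n)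
--
--     dfs(initial_city)
--     return list_so_far, visited
-- ===== Notes on version B (the rewrite author's own statement) =====
-- stated objective: alternative
-- what changed: B precomputes an adjacency dictionary (both directions of every edge, in edge order) in one pass and then does DFS over adjacency lists, instead of A's DFS that rescans the entire edge list at every visited node; on the measured random input family the DFS visits few nodes, so no speedup was observed.
-- outside the precondition, e.g. on prehelper([[1, 99]], 2, [], [0, 0]): A returns ([2], [0, 1]), B returns ([2], [0, 1])
import Mathlib
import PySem

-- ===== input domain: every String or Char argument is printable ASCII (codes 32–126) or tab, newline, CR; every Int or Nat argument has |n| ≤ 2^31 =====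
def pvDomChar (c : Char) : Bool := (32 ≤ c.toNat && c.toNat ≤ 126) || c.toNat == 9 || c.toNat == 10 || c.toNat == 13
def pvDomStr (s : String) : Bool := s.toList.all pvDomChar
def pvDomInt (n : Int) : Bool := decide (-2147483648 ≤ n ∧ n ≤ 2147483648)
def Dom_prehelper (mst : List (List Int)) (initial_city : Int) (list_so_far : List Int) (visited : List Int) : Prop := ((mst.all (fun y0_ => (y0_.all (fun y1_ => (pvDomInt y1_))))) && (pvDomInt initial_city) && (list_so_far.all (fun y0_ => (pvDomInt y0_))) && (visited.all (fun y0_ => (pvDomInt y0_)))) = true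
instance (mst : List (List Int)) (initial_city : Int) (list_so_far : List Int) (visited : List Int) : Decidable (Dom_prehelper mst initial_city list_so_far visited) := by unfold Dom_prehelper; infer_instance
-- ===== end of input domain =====

-- B replaces A's per-node rescan of the whole edge list by a precomputed adjacency
-- dictionary + DFS over adjacency lists (objective: alternative). Both Pythons mutate
-- list_so_far/visited in place and return them; the equivalence is about the RETURN value.

-- ===== PORT A =====
-- A's recursion terminates because every recursive call marks a fresh 0 entry of
-- visited; both ports run the same structural recursion on fuel = visited.length + 2,
-- which exceeds the maximal recursion depth on every input admitted by Pre_.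
-- Python's `for i in range(len(mst))` with only `mst[i]` used is ported as a fold
-- over the elements of mst; visited[c-1] reads/writes use the PySem totalized forms
-- (pyGetD / pySetD), exact under Pre_ (all touched indices in range, incl. negative).
def pvA_go : Nat → List (List Int) → Int → List Int → List Int → List Int × List Int
  | 0, _, _, l, v => (l, v)
  | f+1, mst, c, l, v =>
    mst.foldl (fun s e =>
      let s1 := if PySem.List.pyGetD e 0 0 == c
                   && PySem.List.pyGetD s.2 (PySem.List.pyGetD e 1 0 - 1) 1 == 0
                then pvA_go f mst (PySem.List.pyGetD e 1 0) s.1 s.2 else s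
      if PySem.List.pyGetD e 1 0 == c
         && PySem.List.pyGetD s1.2 (PySem.List.pyGetD e 0 0 - 1) 1 == 0
      then pvA_go f mst (PySem.List.pyGetD e 0 0) s1.1 s1.2 else s1)
      (l ++ [c], PySem.List.pySetD v (c - 1) 1)

def prehelper (mst : List (List Int)) (initial_city : Int) (list_so_far : List Int) (visited : List Int) : List Int × List Int :=
  pvA_go (visited.length + 2) mst initial_city list_so_far visited

-- ===== PORT B =====
-- the two directed pairs contributed by each edge, in B's append order
def pvPairs (mst : List (List Int)) : List (Int × Int) :=
  mst.flatMap (fun e =>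
    [(PySem.List.pyGetD e 0 0, PySem.List.pyGetD e 1 0),
     (PySem.List.pyGetD e 1 0, PySem.List.pyGetD e 0 0)])

-- adj.setdefault(a, []).append(b)  =  modify a [] (· ++ [b])
def pvAdj (mst : List (List Int)) : PySem.Dict Int (List Int) :=
  (pvPairs mst).foldl (fun d p => d.modify p.1 [] (· ++ [p.2])) PySem.Dict.empty

def pvB_go : Nat → PySem.Dict Int (List Int) → Int → List Int → List Int → List Int × List Int
  | 0, _, _, l, v => (l, v)
  | f+1, adj, c, l, v =>
    (adj.getD c []).foldl (fun s n =>
      if PySem.List.pyGetD s.2 (n - 1) 1 == 0 then pvB_go f adj n s.1 s.2 else s)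
      (l ++ [c], PySem.List.pySetD v (c - 1) 1)

def prehelper_alt (mst : List (List Int)) (initial_city : Int) (list_so_far : List Int) (visited : List Int) : List Int × List Int :=
  pvB_go (visited.length + 2) (pvAdj mst) initial_city list_so_far visited

-- ===== PRECONDITION & SPEC =====
-- city c is written/read at Python index c-1 of visited; valid (incl. negative wrap) iff:
def pvValidIdx (visited : List Int) (c : Int) : Prop :=
  1 - (visited.length : Int) ≤ c ∧ c ≤ (visited.length : Int)

-- a city the DFS could possibly recurse into: the initial city, or a valid index whose
-- visited flag is still 0 (flags only ever go 0 -> 1, so anything else is never entered)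
def pvMaybeReached (visited : List Int) (initial_city : Int) (x : Int) : Prop :=
  x = initial_city ∨ (pvValidIdx visited x ∧ PySem.List.pyGetD visited (x - 1) 1 = 0)

-- Pre_ excludes the inputs where A raises IndexError: an edge row shorter than 2, or a city
-- index into visited out of range at a performed read. A only dereferences visited[x-1] for x
-- an endpoint of an edge whose other endpoint is a city the DFS entered, and every entered
-- city is pvMaybeReached; requiring the partner of every possibly-entered endpoint to be a
-- valid index rules every such raise out. It slightly over-approximates (a possibly-entered
-- endpoint incident to no actually entered city is never dereferenced), so A also returns on
-- some excluded inputs — and B agrees there.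
def Pre_prehelper (mst : List (List Int)) (initial_city : Int) (list_so_far : List Int) (visited : List Int) : Prop :=
  pvValidIdx visited initial_city ∧
  ∀ e ∈ mst, 2 ≤ e.length ∧
    (pvMaybeReached visited initial_city (e.getD 0 0) → pvValidIdx visited (e.getD 1 0)) ∧
    (pvMaybeReached visited initial_city (e.getD 1 0) → pvValidIdx visited (e.getD 0 0))

instance (mst : List (List Int)) (initial_city : Int) (list_so_far : List Int) (visited : List Int) : Decidable (Pre_prehelper mst initial_city list_so_far visited) := by
  unfold Pre_prehelper pvMaybeReached pvValidIdx; infer_instance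

def pvWitness_prehelper : List (List Int) × Int × List Int × List Int :=
  ([[1, 2], [1, 3]], 1, [], [0, 0, 0])

def Spec_prehelper (mst : List (List Int)) (initial_city : Int) (list_so_far : List Int) (visited : List Int) (out : List Int × List Int) : Prop := out = prehelper_alt mst initial_city list_so_far visited
instance (mst : List (List Int)) (initial_city : Int) (list_so_far : List Int) (visited : List Int) (out : List Int × List Int) : Decidable (Spec_prehelper mst initial_city list_so_far visited out) := by unfold Spec_prehelper; infer_instance

-- ===== CLAIM (what is proved, stated in full; the proofs are below) =====
def Claim_equal_prehelper : Prop := ∀ (mst : List (List Int)) (initial_city : Int) (list_so_far : List Int) (visited : List Int), Dom_prehelper mst initial_city list_so_far visited → Pre_prehelper mst initial_city list_so_far visited → Spec_prehelper mst initial_city list_so_far visited (prehelper mst initial_city list_so_far visited)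

-- ===== LEMMAS AND PROOFS =====

-- the adjacency list of c is exactly the per-edge contributions, in A's scan order
theorem pvAdj_getD (mst : List (List Int)) (c : Int) :
    (pvAdj mst).getD c [] =
      mst.flatMap (fun e =>
        (if PySem.List.pyGetD e 0 0 == c then [PySem.List.pyGetD e 1 0] else []) ++
        (if PySem.List.pyGetD e 1 0 == c then [PySem.List.pyGetD e 0 0] else [])) := by
  unfold pvAdj pvPairs
  rw [PySem.Dict.getD_foldl_modify_append, List.filter_flatMap, List.map_flatMap]
  simp only [PySem.Dict.getD_empty, List.nil_append]
  congr 1; funext e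
  by_cases h0 : PySem.List.pyGetD e 0 0 == c <;>
    by_cases h1 : PySem.List.pyGetD e 1 0 == c <;>
      simp [List.filter, h0, h1]

-- the two recursions agree at every fuel
theorem pv_go_eq (mst : List (List Int)) :
    ∀ (f : Nat) (c : Int) (l v : List Int),
      pvA_go f mst c l v = pvB_go f (pvAdj mst) c l v := by
  intro f
  induction f with
  | zero => intro c l v; rfl
  | succ f ih =>
    intro c l v
    show mst.foldl _ _ = (( pvAdj mst).getD c []).foldl _ _
    rw [pvAdj_getD mst c, List.foldl_flatMap]
    apply PySem.List.foldl_congr_mem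
    intro s e _
    by_cases h0 : PySem.List.pyGetD e 0 0 == c <;>
      by_cases h1 : PySem.List.pyGetD e 1 0 == c <;>
        simp only [h0, h1, Bool.true_and, Bool.false_and, if_true,
          List.foldl_append, List.foldl_cons, List.foldl_nil, ih] <;>
      by_cases hc1 : PySem.List.pyGetD s.2 (PySem.List.pyGetD e 1 0 - 1) 1 == 0 <;>
        simp [hc1]

-- ===== VERDICT (by name: the statement is the Claim_ definition above) =====
theorem prehelper_spec : Claim_equal_prehelper := by
  intro mst c l v _ _
  show prehelper mst c l v = prehelper_alt mst c l v
  unfold prehelper prehelper_alt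
  exact pv_go_eq mst (v.length + 2) c l v
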